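-- pv_equiv track=rewrite | github.com/Jenni006/SegmentPulse-Hackathon | backend/main.py | run_fit
-- ===== SOURCE A (Python) =====
-- def run_fit(segments: list[dict]) -> dict | None:
--     low, high = 0, len(segments) - 1
--     faulty: dict | None = None
--
--     while low <= high:
--         mid = (low + high) // 2
--         status = segments[mid].get("status")
--         if status in ("FAILED", "DEGRADED"):
--             faulty = segments[mid]
--             high = mid - 1  # search left for earliest fault
--         else:
--             low = mid + 1
--
--     return faulty
-- ===== SOURCE B (Python) =====
-- def run_fit(segments: list[dict]) -> dict | None:
--     def go(segs: list) -> dict | None: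
--         if not segs:
--             return None
--         m = (len(segs) - 1) // 2
--         if segs[m].get("status") in ("FAILED", "DEGRADED"):
--             left = go(segs[:m])
--             return left if left is not None else segs[m]
--         return go(segs[m + 1:])
--     return go(segments)
-- ===== Notes on version B (the rewrite author's own statement) =====
-- stated objective: alternative
-- what changed: A's iterative index-based binary search loop with a mutable 'faulty' accumulator is replaced by a recursion on actual sublists: B splits the list at its pivot with slicing (segs[:m] / segs[m+1:]) and recurses on the sublist, preferring the left recursive result, with no indices, no bounds and no mutable state.
import Mathlib
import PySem

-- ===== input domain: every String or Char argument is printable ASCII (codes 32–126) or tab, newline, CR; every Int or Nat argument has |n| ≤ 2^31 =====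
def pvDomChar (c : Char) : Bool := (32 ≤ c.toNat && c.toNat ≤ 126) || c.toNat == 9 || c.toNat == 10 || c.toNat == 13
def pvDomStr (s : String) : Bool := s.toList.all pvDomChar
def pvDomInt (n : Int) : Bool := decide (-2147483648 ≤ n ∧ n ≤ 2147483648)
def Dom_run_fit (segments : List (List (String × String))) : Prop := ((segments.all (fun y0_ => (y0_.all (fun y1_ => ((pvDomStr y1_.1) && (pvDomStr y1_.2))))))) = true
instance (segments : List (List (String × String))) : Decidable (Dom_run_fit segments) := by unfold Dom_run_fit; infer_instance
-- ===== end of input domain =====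

-- B replaces A's index-based iterative binary-search loop (mutable low/high/faulty) by a
-- recursion on actual SUBLISTS: split at the pivot with slices, recurse on the slice,
-- prefer the left recursive result (alternative decomposition, no indices or accumulator).

-- ===== PORT A =====
-- A's while-loop, transcribed with a fuel counter (fuel = segments.length + 1 always suffices,
-- since each iteration strictly shrinks the interval [low, high] ⊆ [0, length-1]).
def runFitLoop (segments : List (List (String × String))) :
    Nat → Int → Int → Option (List (String × String)) → Option (List (String × String))
  | 0, _, _, faulty => faulty
  | fuel + 1, low, high, faulty =>
    if low ≤ high then
      let mid := PySem.Int.floordiv (low + high) 2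
      let seg := (PySem.List.pyGet? segments mid).getD []   -- index is always in range in A
      let status := PySem.Dict.get? (PySem.Dict.mk seg) "status"
      if status = some "FAILED" ∨ status = some "DEGRADED" then
        runFitLoop segments fuel low (mid - 1) (some seg)
      else
        runFitLoop segments fuel (mid + 1) high faulty
    else faulty

def run_fit (segments : List (List (String × String))) : Option (List (String × String)) :=
  runFitLoop segments (segments.length + 1) 0 ((segments.length : Int) - 1) none

-- ===== PORT B =====
-- B's helper go(segs): recursion on the sublist itself; segs[:m] / segs[m+1:] are PySem slices.
def runFitGo (segs : List (List (String × String))) : Option (List (String × String)) :=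
    if h : segs = [] then none
    else
      let m : Nat := (segs.length - 1) / 2
      let seg := (PySem.List.pyGet? segs (m : Int)).getD []   -- segs[m]: in range since segs ≠ []
      if PySem.Dict.get? (PySem.Dict.mk seg) "status" = some "FAILED" ∨
         PySem.Dict.get? (PySem.Dict.mk seg) "status" = some "DEGRADED" then
        match runFitGo (PySem.List.slice segs (some 0) (some (m : Int))) with
        | some left => some left
        | none => some seg
      else
        runFitGo (PySem.List.slice segs (some ((m : Int) + 1)) none)
  termination_by segs.length
  decreasing_by
  · have hlen : 0 < segs.length := List.length_pos_iff.mpr h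
    simp only [PySem.List.slice_zero_start, PySem.List.slice_to_natCast, List.length_take]
    omega
  · have hlen : 0 < segs.length := List.length_pos_iff.mpr h
    have hc : ((m : Int) + 1) = (((m + 1 : Nat) : Int)) := by push_cast; ring
    rw [hc, PySem.List.slice_from_natCast, List.length_drop]
    omega

def run_fit_alt (segments : List (List (String × String))) : Option (List (String × String)) :=
  runFitGo segments

-- ===== PRECONDITION & SPEC =====
def Spec_run_fit (segments : List (List (String × String))) (out : Option (List (String × String))) : Prop := out = run_fit_alt segments
instance (segments : List (List (String × String))) (out : Option (List (String × String))) : Decidable (Spec_run_fit segments out) := by unfold Spec_run_fit; infer_instance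

-- ===== CLAIM (what is proved, stated in full; the proofs are below) =====
def Claim_equal_run_fit : Prop := ∀ (segments : List (List (String × String))), Dom_run_fit segments → Spec_run_fit segments (run_fit segments)

-- ===== LEMMAS AND PROOFS =====

-- Proof-only helper: A's loop, rephrased as a recursion returning the 'faulty' result directly.
def runFitIdx (segments : List (List (String × String))) :
    Nat → Int → Int → Option (List (String × String))
  | 0, _, _ => none
  | fuel + 1, low, high =>
    if low ≤ high then
      let mid := PySem.Int.floordiv (low + high) 2
      let seg := (PySem.List.pyGet? segments mid).getD []
      let status := PySem.Dict.get? (PySem.Dict.mk seg) "status"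
      if status = some "FAILED" ∨ status = some "DEGRADED" then
        match runFitIdx segments fuel low (mid - 1) with
        | some left => some left
        | none => some seg
      else
        runFitIdx segments fuel (mid + 1) high
    else none

-- A's loop with accumulator `faulty` equals the accumulator-free index recursion.
theorem runFitLoop_eq_idx (segments : List (List (String × String))) :
    ∀ (fuel : Nat) (low high : Int) (faulty : Option (List (String × String))),
      runFitLoop segments fuel low high faulty =
        match runFitIdx segments fuel low high with
        | some r => some r
        | none => faulty := by
  intro fuel
  induction fuel with
  | zero => intro low high faulty; simp [runFitLoop, runFitIdx]
  | succ n ih =>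
    intro low high faulty
    simp only [runFitLoop, runFitIdx]
    split_ifs with hle hf
    · rw [ih]
      cases runFitIdx segments n low (PySem.Int.floordiv (low + high) 2 - 1) <;> simp
    · exact ih _ _ _
    · rfl

-- The index recursion on [low, high] equals B's sublist recursion on the corresponding slice.
theorem runFitIdx_eq_go (segments : List (List (String × String))) :
    ∀ (fuel : Nat) (low high : Int), 0 ≤ low → low ≤ high + 1 →
      high < (segments.length : Int) → (high + 1 - low).toNat ≤ fuel →
      runFitIdx segments fuel low high =
        runFitGo ((segments.drop low.toNat).take (high + 1 - low).toNat) := by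
  intro fuel
  induction fuel with
  | zero =>
    intro low high h0 h1 h2 h3
    have hz : (high + 1 - low).toNat = 0 := by omega
    rw [hz]
    simp [runFitIdx, runFitGo]
  | succ n ih =>
    intro low high h0 h1 h2 h3
    by_cases hle : low ≤ high
    · set k : Nat := (high + 1 - low).toNat with hk
      have hk1 : 1 ≤ k := by omega
      set m : Nat := (k - 1) / 2 with hm
      have hmk : m ≤ k - 1 := by omega
      have hmid : PySem.Int.floordiv (low + high) 2 = low + (m : Int) := by
        rw [PySem.Int.floordiv_eq_ediv_of_pos (by norm_num : (0:Int) < 2)]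
        omega
      have hslen : ((segments.drop low.toNat).take k).length = k := by
        simp only [List.length_take, List.length_drop]
        omega
      have hsne : (segments.drop low.toNat).take k ≠ [] := by
        intro hnil; rw [hnil] at hslen; simp at hslen; omega
      have hidx : low.toNat + m < segments.length := by omega
      have hgetA : (PySem.List.pyGet? segments (low + (m : Int))).getD []
          = segments[low.toNat + m]'hidx := by
        rw [PySem.List.pyGet?_of_nonneg _ (by omega : (0:Int) ≤ low + (m : Int))]
        have ht : (low + (m : Int)).toNat = low.toNat + m := by omega
        rw [ht, List.getElem?_eq_getElem hidx]
        rfl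
      have hgetB : (PySem.List.pyGet? ((segments.drop low.toNat).take k) ((m : Nat) : Int)).getD []
          = segments[low.toNat + m]'hidx := by
        rw [PySem.List.pyGet?_natCast,
            List.getElem?_eq_getElem (by omega : m < ((segments.drop low.toNat).take k).length)]
        simp [List.getElem_take, List.getElem_drop]
      rw [runFitGo, dif_neg hsne]
      simp only [runFitIdx, if_pos hle, hslen, ← hm, hmid, hgetA, hgetB]
      by_cases hf : PySem.Dict.get? (PySem.Dict.mk (segments[low.toNat + m]'hidx)) "status" = some "FAILED" ∨
          PySem.Dict.get? (PySem.Dict.mk (segments[low.toNat + m]'hidx)) "status" = some "DEGRADED"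
      · rw [if_pos hf, if_pos hf]
        have eL : (low + (m : Int) - 1 + 1 - low).toNat = m := by omega
        rw [ih low (low + (m : Int) - 1) h0 (by omega) (by omega) (by omega), eL]
        simp only [PySem.List.slice_zero_start, PySem.List.slice_to_natCast, List.take_take]
        rw [Nat.min_eq_left (by omega : m ≤ k)]
      · rw [if_neg hf, if_neg hf]
        have e1 : (low + (m : Int) + 1).toNat = low.toNat + (m + 1) := by omega
        have e2 : (high + 1 - (low + (m : Int) + 1)).toNat = k - (m + 1) := by omega
        rw [ih (low + (m : Int) + 1) high (by omega) (by omega) h2 (by omega), e1, e2]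
        have hc : ((m : Nat) : Int) + 1 = (((m + 1 : Nat)) : Int) := by push_cast; ring
        rw [hc, PySem.List.slice_from_natCast, List.drop_take, List.drop_drop]
    · have hz : (high + 1 - low).toNat = 0 := by omega
      rw [hz]
      simp [runFitIdx, runFitGo, hle]

theorem run_fit_spec : Claim_equal_run_fit := by
  intro segments _
  unfold Spec_run_fit run_fit run_fit_alt
  rw [runFitLoop_eq_idx,
      runFitIdx_eq_go segments (segments.length + 1) 0 ((segments.length : Int) - 1)
        le_rfl (by omega) (by omega) (by omega)]
  have h1 : ((segments.length : Int) - 1 + 1 - 0).toNat = segments.length := by omega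
  rw [h1]
  simp only [Int.toNat_zero, List.drop_zero, List.take_length]
  cases runFitGo segments <;> rfl
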